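-- pv_equiv track=rewrite | github.com/yharby/geoparquet-io | geoparquet_io/core/extract.py | build_column_selection
-- ===== SOURCE A (Python) =====
-- def build_column_selection(
--     all_columns: list[str],
--     include_cols: list[str] | None,
--     exclude_cols: list[str] | None,
--     geometry_col: str,
--     bbox_col: str | None,
-- ) -> list[str]:
--     """
--     Build list of columns to select.
--
--     Rules:
--     - If include_cols only: select those + geometry + bbox
--     - If exclude_cols only: select all except those
--     - If both: select include_cols, but exclude_cols can remove geometry/bbox
--     - geometry and bbox always included unless in exclude_cols
--
--     Args:
--         all_columns: All columns in schema
--         include_cols: Columns to include (or None)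
--         exclude_cols: Columns to exclude (or None)
--         geometry_col: Name of geometry column
--         bbox_col: Name of bbox column (or None if not present)
--
--     Returns:
--         list: Columns to select (preserving original order)
--     """
--     exclude_set = set(exclude_cols) if exclude_cols else set()
--
--     if include_cols:
--         selected = set(include_cols)
--         # Always add geometry unless explicitly excluded
--         if geometry_col not in exclude_set:
--             selected.add(geometry_col)
--         # Always add bbox unless explicitly excluded
--         if bbox_col and bbox_col not in exclude_set:
--             selected.add(bbox_col)
--     elif exclude_cols:
--         selected = set(all_columns) - exclude_set
--     else:
--         selected = set(all_columns)
--
--     # Preserve original column order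
--     return [c for c in all_columns if c in selected]
-- ===== SOURCE B (Python) =====
-- def build_column_selection(
--     all_columns: list[str],
--     include_cols: list[str] | None,
--     exclude_cols: list[str] | None,
--     geometry_col: str,
--     bbox_col: str | None,
-- ) -> list[str]:
--     """Inverted-index algorithm: build a name -> positions index once, collect
--     the positions of the wanted names, sort them and gather — instead of
--     materialising a selected set and filtering all_columns against it."""
--     # index every column name to its list of positions (handles duplicates)
--     pos = {}
--     for i, c in enumerate(all_columns):
--         pos.setdefault(c, []).append(i)
--     exclude_set = set(exclude_cols or [])
--     if include_cols:
--         wanted = list(include_cols)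
--         if geometry_col not in exclude_set:
--             wanted.append(geometry_col)
--         if bbox_col and bbox_col not in exclude_set:
--             wanted.append(bbox_col)
--         idxs = sorted({i for name in set(wanted) for i in pos.get(name, [])})
--     elif exclude_cols:
--         idxs = sorted({i for name, ps in pos.items() if name not in exclude_set for i in ps})
--     else:
--         return list(all_columns)
--     return [all_columns[i] for i in idxs]
-- ===== Notes on version B (the rewrite author's own statement) =====
-- stated objective: alternative
-- what changed: Replaces A's build-a-selected-set-then-filter scan with an inverted index: a dict mapping each column name to its list of positions is built once, the positions of the wanted names are collected into a set, sorted, and the output is gathered from those indices (A filters all_columns against a selected set).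
import Mathlib
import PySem

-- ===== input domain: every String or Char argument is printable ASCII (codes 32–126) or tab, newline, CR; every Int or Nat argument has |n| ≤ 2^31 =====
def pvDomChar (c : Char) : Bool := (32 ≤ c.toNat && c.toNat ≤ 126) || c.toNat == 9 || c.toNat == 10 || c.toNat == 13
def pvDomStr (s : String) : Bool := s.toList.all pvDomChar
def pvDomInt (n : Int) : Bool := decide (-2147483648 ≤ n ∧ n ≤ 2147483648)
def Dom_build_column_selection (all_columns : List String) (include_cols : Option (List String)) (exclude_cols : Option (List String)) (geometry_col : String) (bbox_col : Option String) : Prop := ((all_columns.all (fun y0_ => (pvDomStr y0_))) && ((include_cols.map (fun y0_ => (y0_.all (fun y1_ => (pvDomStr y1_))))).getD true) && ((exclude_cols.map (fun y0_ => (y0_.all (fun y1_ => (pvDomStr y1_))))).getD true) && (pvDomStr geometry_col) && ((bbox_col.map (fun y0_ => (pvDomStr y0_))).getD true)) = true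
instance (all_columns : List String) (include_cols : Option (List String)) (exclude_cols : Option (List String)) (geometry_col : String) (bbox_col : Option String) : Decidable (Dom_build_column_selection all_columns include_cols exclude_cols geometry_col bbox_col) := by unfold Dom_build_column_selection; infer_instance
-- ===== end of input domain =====

-- B replaces A's build-a-selected-set-then-filter scan by an inverted index (name -> positions dict),
-- collecting the wanted names' positions, sorting them and gathering (alternative algorithm; same result).


-- truthiness of a Python 'list[str] | None' resp. 'str | None'
def pvTruthyList (o : Option (List String)) : Bool :=
  match o with
  | some (_ :: _) => true
  | _ => false

def pvTruthyStr (o : Option String) : Bool :=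
  match o with
  | some s => s != ""
  | none => false

-- ===== PORT A =====
def build_column_selection (all_columns : List String) (include_cols : Option (List String)) (exclude_cols : Option (List String)) (geometry_col : String) (bbox_col : Option String) : List String :=
  let exclude_set : PySem.Set String :=
    if pvTruthyList exclude_cols then PySem.Set.ofList (exclude_cols.getD []) else PySem.Set.empty
  let selected : PySem.Set String :=
    if pvTruthyList include_cols then
      let s0 := PySem.Set.ofList (include_cols.getD [])
      let s1 := if PySem.Set.contains exclude_set geometry_col then s0 else PySem.Set.add s0 geometry_col
      let s2 := if pvTruthyStr bbox_col && !(PySem.Set.contains exclude_set (bbox_col.getD "")) then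
          PySem.Set.add s1 (bbox_col.getD "") else s1
      s2
    else if pvTruthyList exclude_cols then
      PySem.Set.diff (PySem.Set.ofList all_columns) exclude_set
    else
      PySem.Set.ofList all_columns
  all_columns.filter (fun c => PySem.Set.contains selected c)

-- ===== PORT B =====
-- transliteration of Source B: inverted index pos, wanted-name position collection, sort, gather
def build_column_selection_alt (all_columns : List String) (include_cols : Option (List String)) (exclude_cols : Option (List String)) (geometry_col : String) (bbox_col : Option String) : List String :=
  let pos : PySem.Dict String (List Int) :=
    (PySem.List.enumerate all_columns).foldl
      (fun d p => d.modify p.2 [] (fun l => l ++ [p.1])) PySem.Dict.empty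
  let exclude_set : PySem.Set String := PySem.Set.ofList (exclude_cols.getD [])
  if pvTruthyList include_cols then
    let wanted0 := include_cols.getD []
    let wanted1 := if !(PySem.Set.contains exclude_set geometry_col) then wanted0 ++ [geometry_col] else wanted0
    let wanted2 := if pvTruthyStr bbox_col && !(PySem.Set.contains exclude_set (bbox_col.getD "")) then wanted1 ++ [bbox_col.getD ""] else wanted1
    let idxs := PySem.List.sorted (PySem.Set.ofList ((PySem.Set.ofList wanted2).flatMap (fun name => pos.getD name []))) (fun x => x) false
    idxs.map (fun i => (PySem.List.pyGet? all_columns i).getD "")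
  else if pvTruthyList exclude_cols then
    let idxs := PySem.List.sorted (PySem.Set.ofList (pos.items.flatMap (fun q => if PySem.Set.contains exclude_set q.1 then [] else q.2))) (fun x => x) false
    idxs.map (fun i => (PySem.List.pyGet? all_columns i).getD "")
  else
    all_columns


-- ===== PRECONDITION & SPEC =====
def Spec_build_column_selection (all_columns : List String) (include_cols : Option (List String)) (exclude_cols : Option (List String)) (geometry_col : String) (bbox_col : Option String) (out : List String) : Prop := out = build_column_selection_alt all_columns include_cols exclude_cols geometry_col bbox_col
instance (all_columns : List String) (include_cols : Option (List String)) (exclude_cols : Option (List String)) (geometry_col : String) (bbox_col : Option String) (out : List String) : Decidable (Spec_build_column_selection all_columns include_cols exclude_cols geometry_col bbox_col out) := by unfold Spec_build_column_selection; infer_instance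

-- ===== CLAIM (what is proved, stated in full; the proofs are below) =====
def Claim_equal_build_column_selection : Prop := ∀ (all_columns : List String) (include_cols : Option (List String)) (exclude_cols : Option (List String)) (geometry_col : String) (bbox_col : Option String), Dom_build_column_selection all_columns include_cols exclude_cols geometry_col bbox_col → Spec_build_column_selection all_columns include_cols exclude_cols geometry_col bbox_col (build_column_selection all_columns include_cols exclude_cols geometry_col bbox_col)

-- ===== LEMMAS AND PROOFS =====

-- the strictly increasing list of (Int-cast) positions whose column satisfies P
def pvIntIdx (xs : List String) (P : String → Bool) : List Int :=
  ((List.range xs.length).filter (fun k => P (xs.getD k ""))).map (fun (k : Nat) => (k : Int))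

-- the position dictionary's lookup: exactly the positions of the occurrences of nm, in order
lemma posD_getD (xs : List String) (nm : String) :
    (((PySem.List.enumerate xs).foldl
      (fun (d : PySem.Dict String (List Int)) p => d.modify p.2 [] (fun l => l ++ [p.1])) PySem.Dict.empty).getD nm [])
    = ((PySem.List.enumerate xs).filter (fun p => p.2 == nm)).map (·.1) := by
  have h1 : (PySem.List.enumerate xs).foldl
      (fun (d : PySem.Dict String (List Int)) p => d.modify p.2 [] (fun l => l ++ [p.1])) PySem.Dict.empty
    = (((PySem.List.enumerate xs).map (fun p => (p.2, p.1))).foldl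
      (fun (d : PySem.Dict String (List Int)) q => d.modify q.1 [] (fun l => l ++ [q.2])) PySem.Dict.empty) := by
    rw [List.foldl_map]
  rw [h1, PySem.Dict.getD_foldl_modify_append]
  simp [List.filter_map, List.map_map, Function.comp_def]

lemma mem_posD (xs : List String) (nm : String) (i : Int) :
    (i ∈ ((PySem.List.enumerate xs).filter (fun p => p.2 == nm)).map (·.1))
    ↔ ∃ k, k < xs.length ∧ xs.getD k "" = nm ∧ i = (k : Int) := by
  simp only [List.mem_map, List.mem_filter, PySem.List.mem_enumerate_iff]
  constructor
  · rintro ⟨p, ⟨⟨k, hk, rfl⟩, hnm⟩, rfl⟩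
    refine ⟨k, hk, ?_, by simp⟩
    rw [List.getD_eq_getElem?_getD, List.getElem?_eq_getElem hk]
    simpa using hnm
  · rintro ⟨k, hk, hnm, rfl⟩
    refine ⟨((0 : Int) + k, xs[k]), ⟨⟨k, hk, rfl⟩, ?_⟩, by simp⟩
    rw [List.getD_eq_getElem?_getD, List.getElem?_eq_getElem hk] at hnm
    simpa using hnm

lemma range_filter_map_getD (xs : List String) (P : String → Bool) :
    ((List.range xs.length).filter (fun k => P (xs.getD k ""))).map (fun k => xs.getD k "")
    = xs.filter P := by
  induction xs with
  | nil => simp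
  | cons x t ih =>
    rw [List.length_cons, List.range_succ_eq_map, List.filter_cons]
    have h1 : ((List.range t.length).map Nat.succ).filter (fun k => P ((x :: t).getD k ""))
        = ((List.range t.length).filter (fun k => P (t.getD k ""))).map Nat.succ := by
      rw [List.filter_map]; rfl
    simp only [List.getD_cons_zero, h1]
    by_cases hp : P x
    · simp only [hp, if_true, List.map_cons, List.getD_cons_zero, List.map_map]
      simp only [Function.comp_def, List.getD_cons_succ]
      rw [ih, List.filter_cons_of_pos hp]
    · rw [if_neg (by simp [hp]), List.map_map]
      simp only [Function.comp_def, List.getD_cons_succ]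
      rw [ih, List.filter_cons_of_neg (by simp [hp])]

-- the heart of B: sorting the deduplicated collected positions and gathering = filtering
lemma sorted_gather (xs : List String) (P : String → Bool) (L : List Int)
    (hm : ∀ i : Int, i ∈ L ↔ ∃ k, k < xs.length ∧ P (xs.getD k "") = true ∧ i = (k : Int)) :
    (PySem.List.sorted (PySem.Set.ofList L) (fun x => x) false).map
      (fun i => (PySem.List.pyGet? xs i).getD "")
    = xs.filter P := by
  have hpw : (pvIntIdx xs P).Pairwise (fun a b => a < b) := by
    unfold pvIntIdx
    refine List.Pairwise.map _ ?_ (List.Pairwise.filter _ List.pairwise_lt_range)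
    intro a b h; exact_mod_cast h
  have hmemT : ∀ i : Int, i ∈ pvIntIdx xs P ↔ ∃ k, k < xs.length ∧ P (xs.getD k "") = true ∧ i = (k : Int) := by
    intro i
    simp only [pvIntIdx, List.mem_map, List.mem_filter, List.mem_range]
    constructor
    · rintro ⟨k, ⟨hk, hp⟩, rfl⟩; exact ⟨k, hk, hp, rfl⟩
    · rintro ⟨k, hk, hp, rfl⟩; exact ⟨k, ⟨hk, hp⟩, rfl⟩
  have hnodupT : (pvIntIdx xs P).Nodup := List.Pairwise.imp (fun h => ne_of_lt h) hpw
  have hperm : (pvIntIdx xs P).Perm (PySem.Set.ofList L) := by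
    rw [List.perm_ext_iff_of_nodup hnodupT (PySem.Set.nodup_ofList L)]
    intro i; rw [PySem.Set.mem_ofList, hmemT, hm]
  have hs := PySem.List.sorted_eq_of_perm_of_pairwise_lt (PySem.Set.ofList L) (pvIntIdx xs P) (fun x => x) hperm hpw
  rw [hs]
  unfold pvIntIdx
  rw [List.map_map, List.map_congr_left (g := fun k => xs.getD k "") ?h]
  · exact range_filter_map_getD xs P
  · intro k hk
    simp [PySem.List.pyGet?_natCast, List.getD_eq_getElem?_getD]

lemma pos_keys (xs : List String) :
    (((PySem.List.enumerate xs).foldl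
      (fun (d : PySem.Dict String (List Int)) p => d.modify p.2 [] (fun l => l ++ [p.1])) PySem.Dict.empty).keys)
    = PySem.Set.ofList xs := by
  rw [PySem.Dict.keys_foldl_modify_key (PySem.List.enumerate xs) (fun p => p.2) []
      (fun _ p => (fun l => l ++ [p.1])) PySem.Dict.empty]
  rw [PySem.List.map_snd_enumerate]
  rw [PySem.Set.ofList_eq_foldl]
  rfl

lemma pos_keys_nodup (xs : List String) :
    (((PySem.List.enumerate xs).foldl
      (fun (d : PySem.Dict String (List Int)) p => d.modify p.2 [] (fun l => l ++ [p.1])) PySem.Dict.empty).keys).Nodup := by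
  exact PySem.Dict.nodup_keys_foldl_modify_key (PySem.List.enumerate xs) (fun p => p.2) []
      (fun _ p => (fun l => l ++ [p.1])) PySem.Dict.empty (by simp)

lemma mem_flat_include (xs : List String) (W : List String) (i : Int) :
    (i ∈ W.flatMap (fun nm =>
      ((PySem.List.enumerate xs).foldl
        (fun (d : PySem.Dict String (List Int)) p => d.modify p.2 [] (fun l => l ++ [p.1])) PySem.Dict.empty).getD nm []))
    ↔ ∃ k, k < xs.length ∧ decide (xs.getD k "" ∈ W) = true ∧ i = (k : Int) := by
  simp only [List.mem_flatMap, posD_getD, mem_posD, decide_eq_true_eq]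
  constructor
  · rintro ⟨nm, hnm, k, hk, hget, rfl⟩; exact ⟨k, hk, hget ▸ hnm, rfl⟩
  · rintro ⟨k, hk, hmem, rfl⟩; exact ⟨xs.getD k "", hmem, k, hk, rfl, rfl⟩

lemma mem_flat_exclude (xs : List String) (E : PySem.Set String) (i : Int) :
    (i ∈ (((PySem.List.enumerate xs).foldl
        (fun (d : PySem.Dict String (List Int)) p => d.modify p.2 [] (fun l => l ++ [p.1])) PySem.Dict.empty).items).flatMap
        (fun q => if PySem.Set.contains E q.1 then ([] : List Int) else q.2))
    ↔ ∃ k, k < xs.length ∧ (!PySem.Set.contains E (xs.getD k "")) = true ∧ i = (k : Int) := by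
  simp only [List.mem_flatMap]
  constructor
  · rintro ⟨⟨nm, ps⟩, hq, hi⟩
    by_cases hE : PySem.Set.contains E nm = true
    · rw [if_pos hE] at hi; exact absurd hi (List.not_mem_nil)
    · rw [if_neg hE] at hi
      have hget := PySem.Dict.get?_of_mem_items _ hq (pos_keys_nodup xs)
      have hps := PySem.Dict.getD_of_get?_eq_some _ ([] : List Int) hget
      rw [posD_getD] at hps
      rw [← hps] at hi
      obtain ⟨k, hk, hget2, rfl⟩ := (mem_posD xs nm i).1 hi
      refine ⟨k, hk, ?_, rfl⟩
      rw [hget2, Bool.not_eq_eq_eq_not, Bool.not_true]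
      exact Bool.eq_false_iff.mpr hE
  · rintro ⟨k, hk, hE, rfl⟩
    rw [Bool.not_eq_eq_eq_not, Bool.not_true] at hE
    refine ⟨(xs.getD k "",
      (((PySem.List.enumerate xs).foldl
        (fun (d : PySem.Dict String (List Int)) p => d.modify p.2 [] (fun l => l ++ [p.1])) PySem.Dict.empty).getD (xs.getD k "") [])), ?_, ?_⟩
    · rw [PySem.Dict.items_eq_map_keys _ (pos_keys_nodup xs) []]
      refine List.mem_map.2 ⟨xs.getD k "", ?_, rfl⟩
      rw [pos_keys, PySem.Set.mem_ofList]
      rw [List.getD_eq_getElem?_getD, List.getElem?_eq_getElem hk]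
      simp only [Option.getD_some]; exact List.getElem_mem hk
    · rw [if_neg (by rw [hE]; simp)]
      rw [posD_getD]
      exact (mem_posD xs _ _).2 ⟨k, hk, rfl, rfl⟩

lemma build_eq (all_columns : List String) (include_cols : Option (List String)) (exclude_cols : Option (List String)) (geometry_col : String) (bbox_col : Option String) :
    build_column_selection all_columns include_cols exclude_cols geometry_col bbox_col
    = build_column_selection_alt all_columns include_cols exclude_cols geometry_col bbox_col := by
  have hexcl : (if pvTruthyList exclude_cols then PySem.Set.ofList (exclude_cols.getD []) else PySem.Set.empty) = PySem.Set.ofList (exclude_cols.getD []) := by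
    rcases exclude_cols with _ | (_ | ⟨e, es⟩) <;> rfl
  unfold build_column_selection build_column_selection_alt
  rw [hexcl]
  by_cases hi : pvTruthyList include_cols = true
  · simp only [hi, if_true]
    by_cases hb : (pvTruthyStr bbox_col && !(PySem.Set.contains (PySem.Set.ofList (exclude_cols.getD [])) (bbox_col.getD ""))) = true
    · rw [if_pos hb, if_pos hb]
      by_cases hg : PySem.Set.contains (PySem.Set.ofList (exclude_cols.getD [])) geometry_col = true
      · rw [if_pos hg,
          if_neg (show ¬((!(PySem.Set.contains (PySem.Set.ofList (exclude_cols.getD [])) geometry_col)) = true) by intro h; rw [Bool.not_eq_eq_eq_not, Bool.not_true] at h; exact Bool.false_ne_true (h ▸ hg))]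
        rw [sorted_gather all_columns
          (fun c => decide (c ∈ PySem.Set.ofList (include_cols.getD [] ++ [bbox_col.getD ""])))
          _ (mem_flat_include all_columns (PySem.Set.ofList (include_cols.getD [] ++ [bbox_col.getD ""])))]
        refine (List.filter_congr ?_).symm
        intro c _
        rw [Bool.eq_iff_iff]
        simp [PySem.Set.mem_add, PySem.Set.mem_ofList]
      · rw [if_neg hg,
          if_pos (show (!(PySem.Set.contains (PySem.Set.ofList (exclude_cols.getD [])) geometry_col)) = true by
            rw [Bool.not_eq_eq_eq_not, Bool.not_true]; exact Bool.eq_false_iff.mpr hg)]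
        rw [sorted_gather all_columns
          (fun c => decide (c ∈ PySem.Set.ofList ((include_cols.getD [] ++ [geometry_col]) ++ [bbox_col.getD ""])))
          _ (mem_flat_include all_columns (PySem.Set.ofList ((include_cols.getD [] ++ [geometry_col]) ++ [bbox_col.getD ""])))]
        refine (List.filter_congr ?_).symm
        intro c _
        rw [Bool.eq_iff_iff]
        simp [PySem.Set.mem_add, PySem.Set.mem_ofList]
        tauto
    · rw [if_neg hb, if_neg hb]
      by_cases hg : PySem.Set.contains (PySem.Set.ofList (exclude_cols.getD [])) geometry_col = true
      · rw [if_pos hg,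
          if_neg (show ¬((!(PySem.Set.contains (PySem.Set.ofList (exclude_cols.getD [])) geometry_col)) = true) by intro h; rw [Bool.not_eq_eq_eq_not, Bool.not_true] at h; exact Bool.false_ne_true (h ▸ hg))]
        rw [sorted_gather all_columns
          (fun c => decide (c ∈ PySem.Set.ofList (include_cols.getD [])))
          _ (mem_flat_include all_columns (PySem.Set.ofList (include_cols.getD [])))]
        refine (List.filter_congr ?_).symm
        intro c _
        rw [Bool.eq_iff_iff]
        simp [PySem.Set.mem_ofList]
      · rw [if_neg hg,
          if_pos (show (!(PySem.Set.contains (PySem.Set.ofList (exclude_cols.getD [])) geometry_col)) = true by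
            rw [Bool.not_eq_eq_eq_not, Bool.not_true]; exact Bool.eq_false_iff.mpr hg)]
        rw [sorted_gather all_columns
          (fun c => decide (c ∈ PySem.Set.ofList (include_cols.getD [] ++ [geometry_col])))
          _ (mem_flat_include all_columns (PySem.Set.ofList (include_cols.getD [] ++ [geometry_col])))]
        refine (List.filter_congr ?_).symm
        intro c _
        rw [Bool.eq_iff_iff]
        simp [PySem.Set.mem_add, PySem.Set.mem_ofList]
  · simp only [hi, Bool.false_eq_true, if_false]
    by_cases he : pvTruthyList exclude_cols = true
    · simp only [he, if_true]
      rw [sorted_gather all_columns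
        (fun c => !PySem.Set.contains (PySem.Set.ofList (exclude_cols.getD [])) c)
        _ (mem_flat_exclude all_columns (PySem.Set.ofList (exclude_cols.getD [])))]
      refine (List.filter_congr ?_).symm
      intro c hc
      rw [Bool.eq_iff_iff]
      simp [PySem.Set.mem_diff, PySem.Set.mem_ofList, hc]
    · simp only [he, Bool.false_eq_true, if_false]
      refine List.filter_eq_self.mpr ?_
      intro c hc
      simp [PySem.Set.mem_ofList, hc]

-- ===== VERDICT (by name: the statement is the Claim_ definition above) =====
theorem build_column_selection_spec : Claim_equal_build_column_selection := by
  intro all_columns include_cols exclude_cols geometry_col bbox_col _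
  unfold Spec_build_column_selection
  exact build_eq all_columns include_cols exclude_cols geometry_col bbox_col
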